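-- pv_equiv track=rewrite | github.com/kbsvarma/OncoPulse | app/streamlit_app.py | _score_badges
-- ===== SOURCE A (Python) =====
-- def _score_badges(explain: list[str]) -> list[str]:
--     badges: list[str] = []
--     for x in explain:
--         lx = x.lower()
--         if "phase iii" in lx or "phase 3" in lx:
--             badges.append("Phase III")
--         elif "phase ii" in lx or "phase 2" in lx:
--             badges.append("Phase II")
--         elif "randomized" in lx or "rct" in lx:
--             badges.append("RCT")
--         elif "meta-analysis" in lx or "systematic review" in lx:
--             badges.append("Meta-analysis")
--         elif "overall survival" in lx:
--             badges.append("OS")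
--         elif "progression-free survival" in lx:
--             badges.append("PFS")
--         elif "sample size" in lx:
--             badges.append("N>=200")
--         elif "major journal" in lx:
--             badges.append("Major journal")
--         elif "citations bonus" in lx:
--             badges.append("Citations")
--         elif "preclinical signal" in lx:
--             badges.append("Preclinical penalty")
--         elif "case report" in lx:
--             badges.append("Case report penalty")
--         elif "query phrase" in lx:
--             badges.append("Query phrase")
--         elif "query concept" in lx:
--             badges.append("Concept match")
--         elif "query keyword" in lx or "query coverage" in lx:
--             badges.append("Keyword match")
--     # Keep unique order.
--     seen: set[str] = set()
--     unique: list[str] = []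
--     for b in badges:
--         if b in seen:
--             continue
--         seen.add(b)
--         unique.append(b)
--     return unique
-- ===== SOURCE B (Python) =====
-- RULES = [
--     (("phase iii", "phase 3"), "Phase III"),
--     (("phase ii", "phase 2"), "Phase II"),
--     (("randomized", "rct"), "RCT"),
--     (("meta-analysis", "systematic review"), "Meta-analysis"),
--     (("overall survival",), "OS"),
--     (("progression-free survival",), "PFS"),
--     (("sample size",), "N>=200"),
--     (("major journal",), "Major journal"),
--     (("citations bonus",), "Citations"),
--     (("preclinical signal",), "Preclinical penalty"),
--     (("case report",), "Case report penalty"),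
--     (("query phrase",), "Query phrase"),
--     (("query concept",), "Concept match"),
--     (("query keyword", "query coverage"), "Keyword match"),
-- ]
--
--
-- def _score_badges(explain: list[str]) -> list[str]:
--     # Transposed traversal: one sweep per RULE over the whole list, filling a
--     # per-string 'best' slot only where no higher-priority rule has claimed it.
--     lxs = [x.lower() for x in explain]
--     best: list = [None] * len(lxs)
--     for subs, lab in RULES:
--         best = [lab if b is None and any(s in lx for s in subs) else b
--                 for b, lx in zip(best, lxs)]
--     return list(dict.fromkeys(b for b in best if b is not None))
-- ===== Notes on version B (the rewrite author's own statement) =====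
-- stated objective: alternative
-- what changed: Transposes the traversal: instead of classifying each string by walking the elif chain and then deduping with a seen-set, B sweeps the whole list once per rule (rules-major), filling a per-string 'best' label array where still unclaimed, then filters the Nones and dedups via dict.fromkeys.
import Mathlib
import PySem

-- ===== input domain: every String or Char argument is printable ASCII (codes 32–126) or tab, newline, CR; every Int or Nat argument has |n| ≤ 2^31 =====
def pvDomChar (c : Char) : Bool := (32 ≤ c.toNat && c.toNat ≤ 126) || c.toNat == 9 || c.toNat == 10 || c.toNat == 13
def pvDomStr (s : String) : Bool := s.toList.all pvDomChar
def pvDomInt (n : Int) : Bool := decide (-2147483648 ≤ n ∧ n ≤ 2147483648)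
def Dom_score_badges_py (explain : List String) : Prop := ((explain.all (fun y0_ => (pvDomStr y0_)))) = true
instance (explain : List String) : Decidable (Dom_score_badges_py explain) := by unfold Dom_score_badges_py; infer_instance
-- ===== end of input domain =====

-- B transposes the traversal (one sweep per rule over a per-string best-label array,
-- then filter + ordered dedup) instead of A's per-string elif chain + seen-set loop: alternative, same cost.

-- ===== PORT A =====
-- the elif chain, one step of the badge-collecting loop
def scoreStepA (acc : List String) (x : String) : List String :=
  let lx := PySem.Str.lower x
  if PySem.Str.isIn "phase iii" lx || PySem.Str.isIn "phase 3" lx then acc ++ ["Phase III"]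
  else if PySem.Str.isIn "phase ii" lx || PySem.Str.isIn "phase 2" lx then acc ++ ["Phase II"]
  else if PySem.Str.isIn "randomized" lx || PySem.Str.isIn "rct" lx then acc ++ ["RCT"]
  else if PySem.Str.isIn "meta-analysis" lx || PySem.Str.isIn "systematic review" lx then acc ++ ["Meta-analysis"]
  else if PySem.Str.isIn "overall survival" lx then acc ++ ["OS"]
  else if PySem.Str.isIn "progression-free survival" lx then acc ++ ["PFS"]
  else if PySem.Str.isIn "sample size" lx then acc ++ ["N>=200"]
  else if PySem.Str.isIn "major journal" lx then acc ++ ["Major journal"]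
  else if PySem.Str.isIn "citations bonus" lx then acc ++ ["Citations"]
  else if PySem.Str.isIn "preclinical signal" lx then acc ++ ["Preclinical penalty"]
  else if PySem.Str.isIn "case report" lx then acc ++ ["Case report penalty"]
  else if PySem.Str.isIn "query phrase" lx then acc ++ ["Query phrase"]
  else if PySem.Str.isIn "query concept" lx then acc ++ ["Concept match"]
  else if PySem.Str.isIn "query keyword" lx || PySem.Str.isIn "query coverage" lx then acc ++ ["Keyword match"]
  else acc

-- the unique-order loop: state (seen, unique)
def dedupStepA (st : PySem.Set String × List String) (b : String) : PySem.Set String × List String :=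
  if PySem.Set.contains st.1 b then st
  else (PySem.Set.add st.1 b, st.2 ++ [b])

def score_badges_py (explain : List String) : List String :=
  let badges := explain.foldl scoreStepA []
  (badges.foldl dedupStepA (PySem.Set.empty, [])).2

-- ===== PORT B =====
def badgeRules : List (List String × String) :=
  [ (["phase iii", "phase 3"], "Phase III"),
    (["phase ii", "phase 2"], "Phase II"),
    (["randomized", "rct"], "RCT"),
    (["meta-analysis", "systematic review"], "Meta-analysis"),
    (["overall survival"], "OS"),
    (["progression-free survival"], "PFS"),
    (["sample size"], "N>=200"),
    (["major journal"], "Major journal"),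
    (["citations bonus"], "Citations"),
    (["preclinical signal"], "Preclinical penalty"),
    (["case report"], "Case report penalty"),
    (["query phrase"], "Query phrase"),
    (["query concept"], "Concept match"),
    (["query keyword", "query coverage"], "Keyword match") ]

-- one rules-major sweep: '[lab if b is None and any(s in lx for s in subs) else b for b, lx in zip(best, lxs)]'
def sweepRule (best : List (Option String)) (lxs : List String) (r : List String × String) : List (Option String) :=
  (best.zip lxs).map (fun p =>
    if p.1.isNone && r.1.any (fun s => PySem.Str.isIn s p.2) then some r.2 else p.1)

def score_badges_py_alt (explain : List String) : List String :=
  let lxs := explain.map PySem.Str.lower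
  let best := badgeRules.foldl (fun best r => sweepRule best lxs r) (List.replicate lxs.length none)
  PySem.List.dedup (best.filterMap id)

-- ===== PRECONDITION & SPEC =====
def Spec_score_badges_py (explain : List String) (out : List String) : Prop := out = score_badges_py_alt explain
instance (explain : List String) (out : List String) : Decidable (Spec_score_badges_py explain out) := by unfold Spec_score_badges_py; infer_instance

-- ===== CLAIM (what is proved, stated in full; the proofs are below) =====
def Claim_equal_score_badges_py : Prop := ∀ (explain : List String), Dom_score_badges_py explain → Spec_score_badges_py explain (score_badges_py explain)

-- ===== LEMMAS AND PROOFS =====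

-- proof helper: the first matching rule's label (priority order), per string
def firstLabel (lx : String) : List (List String × String) → Option String
  | [] => none
  | r :: rs => if r.1.any (fun s => PySem.Str.isIn s lx) then some r.2 else firstLabel lx rs

-- proof helper: the elif chain expressed through firstLabel
def scoreStepC (acc : List String) (x : String) : List String :=
  let lx := PySem.Str.lower x
  match firstLabel lx badgeRules with
  | some label => acc ++ [label]
  | none => acc

set_option maxHeartbeats 2000000 in
lemma stepC_eq_stepA (acc : List String) (x : String) : scoreStepC acc x = scoreStepA acc x := by
  simp only [scoreStepC, scoreStepA, badgeRules, firstLabel, List.any_cons, List.any_nil,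
    Bool.or_false,
    apply_ite (fun o : Option String => match o with | some label => acc ++ [label] | none => acc)]

lemma foldl_stepC (xs : List String) (acc : List String) :
    xs.foldl scoreStepC acc = acc ++ xs.filterMap (fun x => firstLabel (PySem.Str.lower x) badgeRules) := by
  induction xs generalizing acc with
  | nil => simp
  | cons x t ih =>
      simp only [List.foldl_cons, ih, List.filterMap_cons, scoreStepC]
      cases firstLabel (PySem.Str.lower x) badgeRules <;> simp

-- one sweep over a best array of the form 'lxs.map f'
lemma sweepRule_map (lxs : List String) (f : String → Option String) (r : List String × String) :
    sweepRule (lxs.map f) lxs r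
      = lxs.map (fun lx => if (f lx).isNone && r.1.any (fun s => PySem.Str.isIn s lx) then some r.2 else f lx) := by
  induction lxs with
  | nil => rfl
  | cons lx t ih =>
      simp only [List.map_cons, sweepRule, List.zip_cons_cons] at ih ⊢
      rw [ih]

-- the rules-major fold computes, per string, the first matching rule's label
lemma fold_sweep (rules : List (List String × String)) (lxs : List String) (f : String → Option String) :
    rules.foldl (fun best r => sweepRule best lxs r) (lxs.map f)
      = lxs.map (fun lx => match f lx with | some b => some b | none => firstLabel lx rules) := by
  induction rules generalizing f with
  | nil =>
      simp only [List.foldl_nil, firstLabel]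
      exact List.map_congr_left (fun lx _ => by cases f lx <;> rfl)
  | cons r rs ih =>
      simp only [List.foldl_cons, sweepRule_map, ih]
      refine List.map_congr_left (fun lx _ => ?_)
      cases hf : f lx with
      | some b => simp
      | none =>
          simp only [Option.isNone_none, Bool.true_and, firstLabel]
          by_cases hm : (r.1.any fun s => PySem.Str.isIn s lx) = true
          · rw [if_pos hm, if_pos hm]
          · rw [if_neg hm, if_neg hm]

-- the seen-set dedup loop, started with seen = unique = s, keeps both components equal to the running Set.add fold
lemma dedup_loop_eq (l : List String) (s : PySem.Set String) :
    l.foldl dedupStepA (s, s) = (l.foldl PySem.Set.add s, l.foldl PySem.Set.add s) := by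
  induction l generalizing s with
  | nil => rfl
  | cons b t ih =>
      simp only [List.foldl_cons]
      have h : dedupStepA (s, s) b = (PySem.Set.add s b, PySem.Set.add s b) := by
        simp only [dedupStepA, PySem.Set.add]
        split_ifs <;> rfl
      rw [h, ih]

-- started from empty state, the unique list is exactly the ordered dedup
lemma dedup_loop_nil (l : List String) :
    (l.foldl dedupStepA (PySem.Set.empty, [])).2 = PySem.List.dedup l := by
  rw [PySem.List.dedup_eq_ofList, PySem.Set.ofList_eq_foldl]
  exact congrArg Prod.snd (dedup_loop_eq l PySem.Set.empty)

-- ===== VERDICT (by name: the statement is the Claim_ definition above) =====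
theorem score_badges_py_spec : Claim_equal_score_badges_py := by
  intro explain _
  show score_badges_py explain = score_badges_py_alt explain
  simp only [score_badges_py, score_badges_py_alt]
  have hA : explain.foldl scoreStepA [] = explain.foldl scoreStepC [] :=
    (PySem.List.foldl_congr_mem explain scoreStepC scoreStepA [] (fun acc x _ => stepC_eq_stepA acc x)).symm
  have hB : (badgeRules.foldl (fun best r => sweepRule best (explain.map PySem.Str.lower) r)
        (List.replicate (explain.map PySem.Str.lower).length none)).filterMap id
      = explain.foldl scoreStepC [] := by
    have hrep : (List.replicate (explain.map PySem.Str.lower).length (none : Option String))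
        = (explain.map PySem.Str.lower).map (fun _ => none) := List.map_const'.symm
    rw [hrep, fold_sweep, foldl_stepC]
    simp [List.filterMap_map]
  rw [hA, dedup_loop_nil, hB]
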